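-- pv_equiv track=rewrite | github.com/CosmiWaiHang/NP-Y1S1-PRG1-ASG1 | Main.py | split_historical_score
-- ===== SOURCE A (Python) =====
-- def split_historical_score(
--     size_all_list: list,
--     rank_all_list: list,
--     name_all_list: list,
--     score_all_list: list,
--     by_size: str = '4*4',
-- ) -> list:
--     """
--         Split the full historical score into 2 list.
--             - historical score that matched the board size.
--             - historical score that doesn't matched the board size.
--
--         Parameters
--         ----------
--         size_all_list: list
--             A list containing all the historical size detail.
--
--         rank_all_list: list
--             A list containing all the historical rank detail.
--
--         name_all_list: list
--             A list containing all the historical name detail.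
--
--         score_all_list: list
--             A list containing all the historical score detail.
--
--         by_size: str
--             The specific size that use to split/recognize the list.
--
--         Returns
--         -------
--         splited_historical_list: list
--             - 1st list containing all the detail matched the condition.
--             - 2st list containing all the detail not matched the condition.
--
--             general format are as such [size, rank, name, score]
--     """
--
--     size_list = []
--     rank_list = []
--     name_list = []
--     score_list = []
--
--     size_other_list = []
--     rank_other_list = []
--     name_other_list = []
--     score_other_list = []
--
--     for i in range(len(size_all_list)):
--         size = size_all_list[i]
--         rank = rank_all_list[i]
--         name = name_all_list[i]
--         score = score_all_list[i]
--
--         if by_size == size: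
--             size_list.append(size)
--             rank_list.append(rank)
--             name_list.append(name)
--             score_list.append(score)
--         else:
--             size_other_list.append(size)
--             rank_other_list.append(rank)
--             name_other_list.append(name)
--             score_other_list.append(score)
--
--     return (
--         [size_list, rank_list, name_list, score_list],
--         [size_other_list, rank_other_list, name_other_list, score_other_list]
--     )
-- ===== SOURCE B (Python) =====
-- def split_historical_score(
--     size_all_list: list,
--     rank_all_list: list,
--     name_all_list: list,
--     score_all_list: list,
--     by_size: str = '4*4',
-- ) -> list:
--     # Build one row per entry, partition the rows, then unzip each group
--     # back into four parallel lists.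
--     matched = []
--     unmatched = []
--     for i in range(len(size_all_list)):
--         row = (size_all_list[i], rank_all_list[i],
--                name_all_list[i], score_all_list[i])
--         (matched if by_size == row[0] else unmatched).append(row)
--
--     def unzip(group):
--         if not group:
--             return [[], [], [], []]
--         return [list(col) for col in zip(*group)]
--
--     return (unzip(matched), unzip(unmatched))
-- ===== Notes on version B (the rewrite author's own statement) =====
-- stated objective: idiomatic
-- what changed: B builds one 4-tuple row per index, partitions the rows into matched/unmatched, and unzips each group back into four parallel lists, instead of A's eight interleaved appends into eight accumulators.
import Mathlib
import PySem

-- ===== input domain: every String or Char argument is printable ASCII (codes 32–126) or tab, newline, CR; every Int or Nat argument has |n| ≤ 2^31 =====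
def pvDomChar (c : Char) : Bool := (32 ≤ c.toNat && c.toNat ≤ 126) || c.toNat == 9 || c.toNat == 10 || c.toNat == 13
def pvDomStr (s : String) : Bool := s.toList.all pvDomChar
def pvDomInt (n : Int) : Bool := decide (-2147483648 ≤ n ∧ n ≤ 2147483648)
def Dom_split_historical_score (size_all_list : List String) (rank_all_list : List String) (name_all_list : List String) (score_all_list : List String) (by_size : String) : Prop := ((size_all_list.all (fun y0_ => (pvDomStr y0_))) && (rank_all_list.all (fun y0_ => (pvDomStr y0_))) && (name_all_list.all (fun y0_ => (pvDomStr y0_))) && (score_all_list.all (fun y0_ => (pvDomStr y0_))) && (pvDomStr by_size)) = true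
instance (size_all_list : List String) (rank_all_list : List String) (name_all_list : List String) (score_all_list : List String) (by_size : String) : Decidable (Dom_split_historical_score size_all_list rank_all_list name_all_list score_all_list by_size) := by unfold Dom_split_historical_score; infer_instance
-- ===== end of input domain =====

-- ===== PORT A =====
-- B partitions 4-tuple rows then unzips, instead of A's eight interleaved appends (idiomatic decomposition).
-- Both ports read xs[i] as (pyGet? xs i).getD ""; Pre_ excludes the inputs where Python raises IndexError.
-- State: (size, rank, name, score, size_other, rank_other, name_other, score_other)
def shsStepA (rank_all_list name_all_list score_all_list : List String) (by_size : String)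
    (size_all_list : List String)
    (st : List String × List String × List String × List String × List String × List String × List String × List String)
    (i : Int) :
    List String × List String × List String × List String × List String × List String × List String × List String :=
  let size := (PySem.List.pyGet? size_all_list i).getD ""
  let rank := (PySem.List.pyGet? rank_all_list i).getD ""
  let name := (PySem.List.pyGet? name_all_list i).getD ""
  let score := (PySem.List.pyGet? score_all_list i).getD ""
  match st with
  | (s, r, nm, sc, so, ro, no, sco) =>
    if by_size == size then
      (s ++ [size], r ++ [rank], nm ++ [name], sc ++ [score], so, ro, no, sco)
    else
      (s, r, nm, sc, so ++ [size], ro ++ [rank], no ++ [name], sco ++ [score])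

def split_historical_score (size_all_list : List String) (rank_all_list : List String) (name_all_list : List String) (score_all_list : List String) (by_size : String) : List (List String) × List (List String) :=
  let st := (PySem.List.pyRange 0 size_all_list.length 1).foldl
    (shsStepA rank_all_list name_all_list score_all_list by_size size_all_list)
    ([], [], [], [], [], [], [], [])
  match st with
  | (s, r, nm, sc, so, ro, no, sco) => ([s, r, nm, sc], [so, ro, no, sco])

-- ===== PORT B =====
abbrev ShsRow := String × String × String × String

def shsStepB (rank_all_list name_all_list score_all_list : List String) (by_size : String)
    (size_all_list : List String)
    (st : List ShsRow × List ShsRow) (i : Int) : List ShsRow × List ShsRow :=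
  let row : ShsRow := ((PySem.List.pyGet? size_all_list i).getD "",
                       (PySem.List.pyGet? rank_all_list i).getD "",
                       (PySem.List.pyGet? name_all_list i).getD "",
                       (PySem.List.pyGet? score_all_list i).getD "")
  if by_size == row.1 then (st.1 ++ [row], st.2) else (st.1, st.2 ++ [row])

-- zip(*group) on 4-tuples = the four column projections; empty group gives four empty lists
def shsUnzip (group : List ShsRow) : List (List String) :=
  if group.isEmpty then [[], [], [], []]
  else [group.map (·.1), group.map (·.2.1), group.map (·.2.2.1), group.map (·.2.2.2)]

def split_historical_score_alt (size_all_list : List String) (rank_all_list : List String) (name_all_list : List String) (score_all_list : List String) (by_size : String) : List (List String) × List (List String) :=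
  let st := (PySem.List.pyRange 0 size_all_list.length 1).foldl
    (shsStepB rank_all_list name_all_list score_all_list by_size size_all_list)
    ([], [])
  (shsUnzip st.1, shsUnzip st.2)

-- ===== PRECONDITION & SPEC =====
-- A raises IndexError (and so does B) when one of the rank/name/score lists is shorter than
-- size_all_list; Pre_ excludes exactly those inputs.
def Pre_split_historical_score (size_all_list : List String) (rank_all_list : List String) (name_all_list : List String) (score_all_list : List String) (by_size : String) : Prop :=
  size_all_list.length ≤ rank_all_list.length ∧
  size_all_list.length ≤ name_all_list.length ∧
  size_all_list.length ≤ score_all_list.length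
instance (size_all_list : List String) (rank_all_list : List String) (name_all_list : List String) (score_all_list : List String) (by_size : String) : Decidable (Pre_split_historical_score size_all_list rank_all_list name_all_list score_all_list by_size) := by unfold Pre_split_historical_score; infer_instance

def pvWitness_split_historical_score : List String × List String × List String × List String × String :=
  (["4*4", "5*5"], ["1", "2"], ["ann", "bob"], ["10", "20"], "4*4")

def Spec_split_historical_score (size_all_list : List String) (rank_all_list : List String) (name_all_list : List String) (score_all_list : List String) (by_size : String) (out : List (List String) × List (List String)) : Prop := out = split_historical_score_alt size_all_list rank_all_list name_all_list score_all_list by_size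
instance (size_all_list : List String) (rank_all_list : List String) (name_all_list : List String) (score_all_list : List String) (by_size : String) (out : List (List String) × List (List String)) : Decidable (Spec_split_historical_score size_all_list rank_all_list name_all_list score_all_list by_size out) := by unfold Spec_split_historical_score; infer_instance

-- ===== CLAIM (what is proved, stated in full; the proofs are below) =====
def Claim_equal_split_historical_score : Prop := ∀ (size_all_list : List String) (rank_all_list : List String) (name_all_list : List String) (score_all_list : List String) (by_size : String), Dom_split_historical_score size_all_list rank_all_list name_all_list score_all_list by_size → Pre_split_historical_score size_all_list rank_all_list name_all_list score_all_list by_size → Spec_split_historical_score size_all_list rank_all_list name_all_list score_all_list by_size (split_historical_score size_all_list rank_all_list name_all_list score_all_list by_size)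

-- ===== LEMMAS AND PROOFS =====
-- A's 8-list state is the column-wise image of B's two row lists; preserved by every step.
def shsState (m u : List ShsRow) :
    List String × List String × List String × List String × List String × List String × List String × List String :=
  (m.map (·.1), m.map (·.2.1), m.map (·.2.2.1), m.map (·.2.2.2),
   u.map (·.1), u.map (·.2.1), u.map (·.2.2.1), u.map (·.2.2.2))

theorem shs_fold_eq (rank_all_list name_all_list score_all_list : List String) (by_size : String)
    (size_all_list : List String) :
    ∀ (is : List Int) (m u : List ShsRow),
      is.foldl (shsStepA rank_all_list name_all_list score_all_list by_size size_all_list) (shsState m u)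
        = shsState
            (is.foldl (shsStepB rank_all_list name_all_list score_all_list by_size size_all_list) (m, u)).1
            (is.foldl (shsStepB rank_all_list name_all_list score_all_list by_size size_all_list) (m, u)).2 := by
  intro is
  induction is with
  | nil => intro m u; rfl
  | cons i is ih =>
    intro m u
    simp only [List.foldl_cons]
    by_cases h : by_size == (PySem.List.pyGet? size_all_list i).getD ""
    · rw [show shsStepA rank_all_list name_all_list score_all_list by_size size_all_list (shsState m u) i
            = shsState (m ++ [((PySem.List.pyGet? size_all_list i).getD "",
                               (PySem.List.pyGet? rank_all_list i).getD "",
                               (PySem.List.pyGet? name_all_list i).getD "",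
                               (PySem.List.pyGet? score_all_list i).getD "")]) u from by
            simp [shsStepA, shsState, h],
          show shsStepB rank_all_list name_all_list score_all_list by_size size_all_list (m, u) i
            = (m ++ [((PySem.List.pyGet? size_all_list i).getD "",
                      (PySem.List.pyGet? rank_all_list i).getD "",
                      (PySem.List.pyGet? name_all_list i).getD "",
                      (PySem.List.pyGet? score_all_list i).getD "")], u) from by
            simp [shsStepB, h]]
      exact ih _ _
    · rw [show shsStepA rank_all_list name_all_list score_all_list by_size size_all_list (shsState m u) i
            = shsState m (u ++ [((PySem.List.pyGet? size_all_list i).getD "",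
                               (PySem.List.pyGet? rank_all_list i).getD "",
                               (PySem.List.pyGet? name_all_list i).getD "",
                               (PySem.List.pyGet? score_all_list i).getD "")]) from by
            simp [shsStepA, shsState, h],
          show shsStepB rank_all_list name_all_list score_all_list by_size size_all_list (m, u) i
            = (m, u ++ [((PySem.List.pyGet? size_all_list i).getD "",
                      (PySem.List.pyGet? rank_all_list i).getD "",
                      (PySem.List.pyGet? name_all_list i).getD "",
                      (PySem.List.pyGet? score_all_list i).getD "")]) from by
            simp [shsStepB, h]]
      exact ih _ _

theorem shsUnzip_eq_cols (g : List ShsRow) :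
    shsUnzip g = [g.map (·.1), g.map (·.2.1), g.map (·.2.2.1), g.map (·.2.2.2)] := by
  cases g <;> simp [shsUnzip]

-- ===== VERDICT (by name: the statement is the Claim_ definition above) =====
theorem split_historical_score_spec : Claim_equal_split_historical_score := by
  intro size_all_list rank_all_list name_all_list score_all_list by_size _ _
  unfold Spec_split_historical_score split_historical_score split_historical_score_alt
  have h := shs_fold_eq rank_all_list name_all_list score_all_list by_size size_all_list
    (PySem.List.pyRange 0 size_all_list.length 1) [] []
  simp only [show shsState ([] : List ShsRow) ([] : List ShsRow)
      = ([], [], [], [], [], [], [], []) from rfl] at h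
  rw [h]
  simp [shsState, shsUnzip_eq_cols]
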